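-- pv_equiv track=rewrite | github.com/Rom1378/EN2CN | subtitle_handler.py | convert_vtt_to_srt
-- ===== SOURCE A (Python) =====
-- def convert_vtt_to_srt(vtt_content):
--     """Convert VTT format to SRT format"""
--     # Remove VTT header and WEBVTT line
--     lines = vtt_content.split('\n')
--     while lines and (lines[0].startswith('WEBVTT') or not lines[0].strip()):
--         lines.pop(0)
--
--     # Convert timestamps and format
--     srt_lines = []
--     counter = 1
--     i = 0
--
--     while i < len(lines):
--         if not lines[i].strip():
--             i += 1
--             continue
--
--         # Timestamp line
--         if '-->' in lines[i]:
--             timestamp = lines[i].replace('.', ',')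
--             srt_lines.append(str(counter))
--             srt_lines.append(timestamp)
--             counter += 1
--             i += 1
--
--             # Text lines
--             text_lines = []
--             while i < len(lines) and lines[i].strip():
--                 text_lines.append(lines[i])
--                 i += 1
--             srt_lines.append('\n'.join(text_lines))
--             srt_lines.append('')
--         else:
--             i += 1
--
--     return '\n'.join(srt_lines)
-- ===== SOURCE B (Python) =====
-- def convert_vtt_to_srt(vtt_content):
--     """Convert VTT format to SRT format"""
--     lines = vtt_content.split('\n')
--     while lines and (lines[0].startswith('WEBVTT') or not lines[0].strip()):
--         lines.pop(0)
--
--     # Group the remaining lines into blocks of consecutive non-blank lines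
--     blocks = []
--     cur = []
--     for line in lines:
--         if line.strip():
--             cur.append(line)
--         elif cur:
--             blocks.append(cur)
--             cur = []
--     if cur:
--         blocks.append(cur)
--
--     # Each block with a timestamp line becomes one SRT cue
--     parts = []
--     counter = 1
--     for block in blocks:
--         for j, line in enumerate(block):
--             if '-->' in line:
--                 parts.append(str(counter))
--                 parts.append(line.replace('.', ','))
--                 counter += 1
--                 parts.append('\n'.join(block[j + 1:]))
--                 parts.append('')
--                 break
--     return '\n'.join(parts)
-- ===== Notes on version B (the rewrite author's own statement) =====
-- stated objective: alternative
-- what changed: Replaces A's single index-driven scan with nested text-collecting while loops by a two-phase pipeline: group the lines into blank-separated blocks, then emit one SRT cue per block from its first timestamp (arrow) line onward.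
import Mathlib
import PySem

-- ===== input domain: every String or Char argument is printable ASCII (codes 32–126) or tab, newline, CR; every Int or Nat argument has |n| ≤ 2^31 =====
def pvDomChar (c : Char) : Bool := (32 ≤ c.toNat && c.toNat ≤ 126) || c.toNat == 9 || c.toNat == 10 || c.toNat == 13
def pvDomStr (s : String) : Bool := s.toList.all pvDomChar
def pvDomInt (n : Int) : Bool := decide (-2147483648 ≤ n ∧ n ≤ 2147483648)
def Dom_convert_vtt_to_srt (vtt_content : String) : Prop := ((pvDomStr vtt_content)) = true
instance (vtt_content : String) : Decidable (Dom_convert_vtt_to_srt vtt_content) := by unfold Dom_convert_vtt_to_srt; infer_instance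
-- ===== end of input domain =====

-- B restructures A's index-driven scan into block grouping + per-block emission; same cost ("alternative").

-- ===== PORT A =====
-- header-removal while loop: pop leading WEBVTT / blank lines
def pvDropHeaderA : List String → List String
  | [] => []
  | l :: ls =>
    if PySem.Str.startswith l "WEBVTT" || PySem.Str.strip l == "" then pvDropHeaderA ls
    else l :: ls

-- inner while: collect text_lines while lines[i].strip()
def pvTextSplitA : List String → List String × List String
  | [] => ([], [])
  | l :: ls =>
    if PySem.Str.strip l ≠ "" then
      let p := pvTextSplitA ls
      (l :: p.1, p.2)
    else ([], l :: ls)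

theorem pvTextSplitA_snd_len (ls : List String) : (pvTextSplitA ls).2.length ≤ ls.length := by
  induction ls with
  | nil => simp [pvTextSplitA]
  | cons l ls ih =>
    simp only [pvTextSplitA]
    split
    · exact Nat.le_succ_of_le ih
    · simp

-- main while loop over the remaining lines (the index i becomes the remaining suffix)
def pvLoopA : List String → Int → List String
  | [], _ => []
  | l :: ls, c =>
    if PySem.Str.strip l = "" then pvLoopA ls c
    else if PySem.Str.isIn "-->" l then
      let p := pvTextSplitA ls
      PySem.Int.toStr c :: PySem.Str.replace l "." "," ::
        PySem.Str.join "\n" p.1 :: "" :: pvLoopA p.2 (c + 1)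
    else pvLoopA ls c
termination_by ls _ => ls.length
decreasing_by
  all_goals simp only [List.length_cons]
  all_goals first
    | omega
    | exact Nat.lt_succ_of_le (pvTextSplitA_snd_len ls)

def convert_vtt_to_srt (vtt_content : String) : String :=
  PySem.Str.join "\n" (pvLoopA (pvDropHeaderA ((PySem.Str.split? vtt_content "\n").getD [])) 1)

-- ===== PORT B =====
-- same verbatim header-removal loop as in Source B
def pvDropHeaderB : List String → List String
  | [] => []
  | l :: ls =>
    if PySem.Str.startswith l "WEBVTT" || PySem.Str.strip l == "" then pvDropHeaderB ls
    else l :: ls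

-- for line in lines: group into blank-separated blocks (cur is the accumulator list)
def pvBlocksB : List String → List String → List (List String)
  | [], cur => if cur.isEmpty then [] else [cur]
  | l :: ls, cur =>
    if PySem.Str.strip l ≠ "" then pvBlocksB ls (cur ++ [l])
    else if cur.isEmpty then pvBlocksB ls cur
    else cur :: pvBlocksB ls []

-- the 'for j, line in enumerate(block) … break' search for the first timestamp line
def pvFindTsB : List String → Option (String × List String)
  | [] => none
  | l :: ls => if PySem.Str.isIn "-->" l then some (l, ls) else pvFindTsB ls

-- for block in blocks: emit one cue per block containing a timestamp line
def pvProcB : List (List String) → Int → List String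
  | [], _ => []
  | b :: bs, c =>
    match pvFindTsB b with
    | none => pvProcB bs c
    | some (ts, rest) =>
        PySem.Int.toStr c :: PySem.Str.replace ts "." "," ::
          PySem.Str.join "\n" rest :: "" :: pvProcB bs (c + 1)

def convert_vtt_to_srt_alt (vtt_content : String) : String :=
  PySem.Str.join "\n" (pvProcB (pvBlocksB (pvDropHeaderB ((PySem.Str.split? vtt_content "\n").getD [])) []) 1)

-- ===== PRECONDITION & SPEC =====
def Spec_convert_vtt_to_srt (vtt_content : String) (out : String) : Prop := out = convert_vtt_to_srt_alt vtt_content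
instance (vtt_content : String) (out : String) : Decidable (Spec_convert_vtt_to_srt vtt_content out) := by unfold Spec_convert_vtt_to_srt; infer_instance

-- ===== CLAIM (what is proved, stated in full; the proofs are below) =====
def Claim_equal_convert_vtt_to_srt : Prop := ∀ (vtt_content : String), Dom_convert_vtt_to_srt vtt_content → Spec_convert_vtt_to_srt vtt_content (convert_vtt_to_srt vtt_content)

-- ===== LEMMAS AND PROOFS =====

theorem pvDropHeader_eq (ls : List String) : pvDropHeaderB ls = pvDropHeaderA ls := by
  induction ls with
  | nil => rfl
  | cons l ls ih => simp only [pvDropHeaderA, pvDropHeaderB, ih]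

-- rest list starts with a blank line (or is empty)
def pvBlankStart : List String → Prop
  | [] => True
  | h :: _ => PySem.Str.strip h = ""

theorem pvTextSplitA_decomp (ls : List String) :
    (pvTextSplitA ls).1 ++ (pvTextSplitA ls).2 = ls := by
  induction ls with
  | nil => rfl
  | cons l ls ih =>
    simp only [pvTextSplitA]
    split
    · simpa using ih
    · simp

theorem pvTextSplitA_fst_nonblank (ls : List String) :
    ∀ x ∈ (pvTextSplitA ls).1, PySem.Str.strip x ≠ "" := by
  induction ls with
  | nil => simp [pvTextSplitA]
  | cons l ls ih =>
    simp only [pvTextSplitA]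
    split
    · intro x hx
      rcases List.mem_cons.1 hx with h | h
      · subst h; assumption
      · exact ih x h
    · simp

theorem pvTextSplitA_snd_blankStart (ls : List String) :
    pvBlankStart (pvTextSplitA ls).2 := by
  induction ls with
  | nil => trivial
  | cons l ls ih =>
    simp only [pvTextSplitA]
    split
    · exact ih
    · next h =>
        simp only [ne_eq, not_not] at h
        simpa [pvBlankStart] using h

theorem pvTextSplitA_append (bl rest : List String)
    (hb : ∀ x ∈ bl, PySem.Str.strip x ≠ "") (hr : pvBlankStart rest) :
    pvTextSplitA (bl ++ rest) = (bl, rest) := by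
  induction bl with
  | nil =>
    cases rest with
    | nil => rfl
    | cons h t =>
      simp only [List.nil_append, pvTextSplitA]
      rw [if_neg (by simpa [pvBlankStart] using hr)]
  | cons l bl ih =>
    simp only [List.cons_append, pvTextSplitA]
    rw [if_pos (hb l (List.mem_cons_self))]
    rw [ih (fun x hx => hb x (List.mem_cons_of_mem _ hx))]

theorem pvBlocksB_push (ls cur : List String) (hc : cur ≠ []) :
    pvBlocksB ls cur = (cur ++ (pvTextSplitA ls).1) :: pvBlocksB (pvTextSplitA ls).2.tail [] := by
  induction ls generalizing cur with
  | nil => simp [pvBlocksB, pvTextSplitA, hc]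
  | cons l ls ih =>
    simp only [pvBlocksB, pvTextSplitA]
    split
    · next h =>
      rw [ih (cur ++ [l]) (by simp)]
      simp
    · next h =>
      rw [if_neg (by simp [hc])]
      simp

theorem pvLoopA_block (bl : List String) (rest : List String) (c : Int)
    (hb : ∀ x ∈ bl, PySem.Str.strip x ≠ "") (hr : pvBlankStart rest) :
    pvLoopA (bl ++ rest) c =
      match pvFindTsB bl with
      | none => pvLoopA rest c
      | some (ts, after) =>
          PySem.Int.toStr c :: PySem.Str.replace ts "." "," ::
            PySem.Str.join "\n" after :: "" :: pvLoopA rest (c + 1) := by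
  induction bl generalizing c with
  | nil => simp [pvFindTsB]
  | cons l bl ih =>
    have hl : PySem.Str.strip l ≠ "" := hb l List.mem_cons_self
    have hb' : ∀ x ∈ bl, PySem.Str.strip x ≠ "" := fun x hx => hb x (List.mem_cons_of_mem _ hx)
    simp only [List.cons_append, pvLoopA, pvFindTsB]
    rw [if_neg hl]
    by_cases hts : PySem.Str.isIn "-->" l
    · rw [if_pos hts]
      simp only [pvTextSplitA_append bl rest hb' hr, hts, if_pos]
    · rw [if_neg hts, if_neg (by simpa using hts)]
      exact ih c hb'

theorem pvLoop_eq_proc (ls : List String) (c : Int) :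
    pvLoopA ls c = pvProcB (pvBlocksB ls []) c := by
  induction hn : ls.length using Nat.strong_induction_on generalizing ls c with
  | _ n ih =>
  cases ls with
  | nil => simp [pvLoopA, pvBlocksB, pvProcB]
  | cons l ls =>
    by_cases hl : PySem.Str.strip l = ""
    · have h1 : pvLoopA (l :: ls) c = pvLoopA ls c := by rw [pvLoopA, if_pos hl]
      have h2 : pvBlocksB (l :: ls) [] = pvBlocksB ls [] := by
        simp [pvBlocksB, hl]
      rw [h1, h2, ih ls.length (by simp [← hn]) ls c rfl]
    · -- non-blank head: it starts a block
      have hdec := pvTextSplitA_decomp ls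
      have hb : ∀ x ∈ l :: (pvTextSplitA ls).1, PySem.Str.strip x ≠ "" := by
        intro x hx
        rcases List.mem_cons.1 hx with h | h
        · subst h; exact hl
        · exact pvTextSplitA_fst_nonblank ls x h
      have hr : pvBlankStart (pvTextSplitA ls).2 := pvTextSplitA_snd_blankStart ls
      have hsplit : l :: ls = (l :: (pvTextSplitA ls).1) ++ (pvTextSplitA ls).2 := by
        simp [hdec]
      have hA := pvLoopA_block (l :: (pvTextSplitA ls).1) (pvTextSplitA ls).2 c hb hr
      have hB : pvBlocksB ((l :: (pvTextSplitA ls).1) ++ (pvTextSplitA ls).2) [] =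
          (l :: (pvTextSplitA ls).1) :: pvBlocksB (pvTextSplitA ls).2.tail [] := by
        have hhead : pvBlocksB ((l :: (pvTextSplitA ls).1) ++ (pvTextSplitA ls).2) [] =
            pvBlocksB ((pvTextSplitA ls).1 ++ (pvTextSplitA ls).2) [l] := by
          simp only [List.cons_append, pvBlocksB]
          rw [if_pos hl]
          rfl
        rw [hhead, pvBlocksB_push ((pvTextSplitA ls).1 ++ (pvTextSplitA ls).2) [l] (by simp)]
        rw [pvTextSplitA_append (pvTextSplitA ls).1 (pvTextSplitA ls).2
          (fun x hx => hb x (List.mem_cons_of_mem _ hx)) hr]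
        simp
      have htail : ∀ c' : Int, pvLoopA (pvTextSplitA ls).2 c' =
          pvProcB (pvBlocksB (pvTextSplitA ls).2.tail []) c' := by
        intro c'
        cases hre : (pvTextSplitA ls).2 with
        | nil => simp [pvLoopA, pvBlocksB, pvProcB]
        | cons h t =>
          have hhb : PySem.Str.strip h = "" := by
            have := hr; rw [hre] at this; exact this
          have hskip : pvLoopA (h :: t) c' = pvLoopA t c' := by rw [pvLoopA, if_pos hhb]
          have hlen : t.length < n := by
            have h2 := pvTextSplitA_snd_len ls
            rw [hre] at h2
            rw [← hn]
            simp only [List.length_cons] at h2 ⊢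
            omega
          rw [hskip]
          simpa using ih t.length hlen t c' rfl
      rw [hsplit, hA, hB]
      cases hts : pvFindTsB (l :: (pvTextSplitA ls).1) with
      | none => simp only [pvProcB, hts]; exact htail c
      | some p =>
        cases p with
        | mk ts after => simp only [pvProcB, hts]; rw [htail (c + 1)]

-- ===== VERDICT (by name: the statement is the Claim_ definition above) =====
theorem convert_vtt_to_srt_spec : Claim_equal_convert_vtt_to_srt := by
  intro v _
  unfold Spec_convert_vtt_to_srt convert_vtt_to_srt convert_vtt_to_srt_alt
  rw [pvDropHeader_eq, pvLoop_eq_proc]
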